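-- pv_equiv track=rewrite | github.com/leila100/coding-exercises | codeSignal/theCore/mirrorLake/numberOfClans.py | numberOfClans
-- ===== SOURCE A (Python) =====
-- def numberOfClans(divisors, k):
--     '''
--     For the integers 1 to k inclusive, those that share the same divisors from the array divisors belong to the same clan.
--     '''
--     divs = {}
--     clans = {}
--     for num in range(1, k+1):
--         for div in divisors:
--             if num % div == 0:
--                 if num not in divs:
--                     divs[num] = ""
--                 divs[num] += str(div) + "-"
--         if num in divs:
--             if divs[num] not in clans:
--                 clans[divs[num]] = set()
--             clans[divs[num]].add(num)
--         else:
--             if "empty" not in clans: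
--                 clans["empty"] = set()
--             clans["empty"].add(num)
--
--     return len(clans.keys())
-- ===== SOURCE B (Python) =====
-- def numberOfClans(divisors, k):
--     # Period trick: divisibility patterns repeat with period lcm(|divisors|),
--     # so it suffices to scan 1..min(k, lcm) and count distinct signatures.
--     lcm = 1
--     for d in divisors:
--         if d != 0:
--             a, b = lcm, abs(d)
--             while b:
--                 a, b = b, a % b
--             lcm = lcm * abs(d) // a
--     sigs = set()
--     for n in range(1, min(k, lcm) + 1):
--         sig = "".join(str(d) + "-" for d in divisors if n % d == 0)
--         sigs.add(sig if sig else "empty")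
--     return len(sigs)
-- ===== Notes on version B (the rewrite author's own statement) =====
-- stated objective: alternative
-- what changed: Replaces A's two dicts (num->signature-string, signature->clan set) by a single pass that collects the distinct signature strings in a set, scanning only 1..min(k, lcm(|divisors|)) since divisor patterns repeat with period lcm.
import Mathlib
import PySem

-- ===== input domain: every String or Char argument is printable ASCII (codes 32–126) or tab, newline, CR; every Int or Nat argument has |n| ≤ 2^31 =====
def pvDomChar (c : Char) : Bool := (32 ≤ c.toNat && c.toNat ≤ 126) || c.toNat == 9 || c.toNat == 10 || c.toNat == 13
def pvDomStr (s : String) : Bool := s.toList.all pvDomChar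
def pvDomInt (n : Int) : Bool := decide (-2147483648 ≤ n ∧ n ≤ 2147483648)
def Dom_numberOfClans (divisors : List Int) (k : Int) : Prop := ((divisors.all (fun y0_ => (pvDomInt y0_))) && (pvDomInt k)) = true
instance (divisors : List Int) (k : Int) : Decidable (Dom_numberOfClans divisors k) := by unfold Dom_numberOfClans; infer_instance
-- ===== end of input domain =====

-- B replaces A's two dicts by a single scan of 1..min(k, lcm|divisors|) collecting the
-- distinct divisor-signature strings in a set (signatures are periodic with period lcm).

-- ===== PORT A =====
-- clans[div s[num]].add(num): Python mutates the stored set in place after one dict lookup;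
-- this helper is that single lookup-and-update on the assoc list (first matching key's set
-- gets num prepended; num is new each iteration since the nums scanned strictly increase,
-- so prepending equals set add). Exact for the resulting dict.
def pvAddToKey (items : List (String × PySem.Set Int)) (key : String) (num : Int) :
    List (String × PySem.Set Int) :=
  match items with
  | [] => []
  | (k, s) :: rest =>
      if k == key then (k, num :: s) :: rest else (k, s) :: pvAddToKey rest key num

def numberOfClans (divisors : List Int) (k : Int) : Int :=
  -- for num in range(1, k+1): … ; return len(clans.keys())
  -- divs[num] is written and read only during num's own iteration and entries for earlier
  -- nums are never read again, so the port keeps just the current num's entry of divs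
  -- (exact for the result; keeps the assoc-list dict evaluable on large k).
  let clans := (PySem.List.pyRange 1 (k+1) 1).foldl
    (fun (clans : PySem.Dict String (PySem.Set Int)) num =>
      let divs := divisors.foldl
        (fun (divs : PySem.Dict Int String) dv =>
          if PySem.Int.mod num dv = 0 then
            -- if num not in divs: divs[num] = ""    ; divs[num] += str(div) + "-"
            let divs := if divs.contains num then divs else divs.insert num ""
            divs.insert num (divs.getD num "" ++ (PySem.Int.toStr dv ++ "-"))
          else divs) PySem.Dict.empty
      if divs.contains num then
        let key := divs.getD num ""   -- divs[num]; the key is present here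
        let clans := if clans.contains key then clans else clans.insert key PySem.Set.empty
        PySem.Dict.mk (pvAddToKey clans.items key num)
      else
        let clans := if clans.contains "empty" then clans else clans.insert "empty" PySem.Set.empty
        PySem.Dict.mk (pvAddToKey clans.items "empty" num))
    PySem.Dict.empty
  ((PySem.Dict.keys clans).length : Int)

-- ===== PORT B =====
-- a, b = lcm, abs(d); while b: a, b = b, a % b   (b stays ≥ 0 here; 'while b' = 'while 0 < b')
def pvEuclid (a b : Int) : Int :=
  if 0 < b then pvEuclid b (PySem.Int.mod a b) else a
termination_by b.toNat
decreasing_by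
  rename_i h
  have h1 := PySem.Int.mod_nonneg a h
  have h2 := PySem.Int.mod_lt a h
  omega

def numberOfClans_alt (divisors : List Int) (k : Int) : Int :=
  let lcm := divisors.foldl
    (fun L d => if d ≠ 0 then PySem.Int.floordiv (L * |d|) (pvEuclid L |d|) else L) 1
  let sigs := (PySem.List.pyRange 1 (min k lcm + 1) 1).foldl
    (fun (s : PySem.Set String) n =>
      -- sig = "".join(str(d) + "-" for d in divisors if n % d == 0)
      let sig := String.join (divisors.filterMap
        (fun d => if PySem.Int.mod n d = 0 then some (PySem.Int.toStr d ++ "-") else none))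
      PySem.Set.add s (if sig = "" then "empty" else sig))
    PySem.Set.empty
  (PySem.Set.len sigs : Int)

-- ===== PRECONDITION & SPEC =====
-- Pre_ excludes exactly the inputs where A raises ZeroDivisionError: a 0 divisor together with k ≥ 1 (B raises there too).
def Pre_numberOfClans (divisors : List Int) (k : Int) : Prop := k ≤ 0 ∨ (0 : Int) ∉ divisors
instance (divisors : List Int) (k : Int) : Decidable (Pre_numberOfClans divisors k) := by
  unfold Pre_numberOfClans; infer_instance

def pvWitness_numberOfClans : List Int × Int := ([2, 3, -4], 10)

def Spec_numberOfClans (divisors : List Int) (k : Int) (out : Int) : Prop := out = numberOfClans_alt divisors k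
instance (divisors : List Int) (k : Int) (out : Int) : Decidable (Spec_numberOfClans divisors k out) := by unfold Spec_numberOfClans; infer_instance

-- ===== CLAIM (what is proved, stated in full; the proofs are below) =====
def Claim_equal_numberOfClans : Prop := ∀ (divisors : List Int) (k : Int), Dom_numberOfClans divisors k → Pre_numberOfClans divisors k → Spec_numberOfClans divisors k (numberOfClans divisors k)

-- ===== LEMMAS AND PROOFS =====

-- the signature of n w.r.t. divisors, and the clan key it induces
def fmA (n d : Int) : Option String :=
  if PySem.Int.mod n d = 0 then some (PySem.Int.toStr d ++ "-") else none

def sigOf (divisors : List Int) (n : Int) : String :=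
  String.join (divisors.filterMap (fmA n))

def keyOf (divisors : List Int) (n : Int) : String :=
  if sigOf divisors n = "" then "empty" else sigOf divisors n

-- A's inner loop body and outer loop body, named for the proofs (definitional copies of the port's lambdas)
def stepA (num : Int) (divs : PySem.Dict Int String) (dv : Int) : PySem.Dict Int String :=
  if PySem.Int.mod num dv = 0 then
    let divs := if divs.contains num then divs else divs.insert num ""
    divs.insert num (divs.getD num "" ++ (PySem.Int.toStr dv ++ "-"))
  else divs

def bigStepA (divisors : List Int)
    (clans : PySem.Dict String (PySem.Set Int)) (num : Int) :
    PySem.Dict String (PySem.Set Int) :=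
  let divs := divisors.foldl (stepA num) PySem.Dict.empty
  if divs.contains num then
    let key := divs.getD num ""
    let clans := if clans.contains key then clans else clans.insert key PySem.Set.empty
    PySem.Dict.mk (pvAddToKey clans.items key num)
  else
    let clans := if clans.contains "empty" then clans else clans.insert "empty" PySem.Set.empty
    PySem.Dict.mk (pvAddToKey clans.items "empty" num)

theorem numberOfClans_eq (divisors : List Int) (k : Int) :
    numberOfClans divisors k
      = ((((PySem.List.pyRange 1 (k+1) 1).foldl (bigStepA divisors)
            PySem.Dict.empty)).keys.length : Int) := rfl

def lcmF (divisors : List Int) : Int :=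
  divisors.foldl (fun L d => if d ≠ 0 then PySem.Int.floordiv (L * |d|) (pvEuclid L |d|) else L) 1

theorem join_foldl (l : List String) (x : String) :
    List.foldl (fun r s => r ++ s) x l = x ++ String.join l := by
  induction l generalizing x with
  | nil => simp [String.join]
  | cons h t ih =>
    show List.foldl (fun r s => r ++ s) (x ++ h) t = x ++ String.join (h :: t)
    rw [ih]
    have : String.join (h :: t) = List.foldl (fun r s => r ++ s) ("" ++ h) t := rfl
    rw [this, String.empty_append, ih, String.append_assoc]

theorem join_cons (a : String) (l : List String) :
    String.join (a :: l) = a ++ String.join l := by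
  have : String.join (a :: l) = List.foldl (fun r s => r ++ s) ("" ++ a) l := rfl
  rw [this, String.empty_append, join_foldl]

theorem join_fm_eq_empty_iff (ds : List Int) (n : Int) :
    String.join (ds.filterMap (fmA n)) = "" ↔ ds.filterMap (fmA n) = [] := by
  cases h : ds.filterMap (fmA n) with
  | nil => simp [String.join]
  | cons a t =>
    simp only [join_cons]
    constructor
    · intro hj
      exfalso
      have ha : a ∈ ds.filterMap (fmA n) := by rw [h]; exact List.mem_cons_self
      rw [List.mem_filterMap] at ha
      obtain ⟨d, _, hd⟩ := ha
      unfold fmA at hd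
      have hdash : ("-" : String).length = 1 := rfl
      have halen : 1 ≤ a.length := by
        split at hd
        · cases hd; rw [String.length_append, hdash]; omega
        · cases hd
      have hnil : ("" : String).length = 0 := rfl
      have := congrArg String.length hj
      rw [String.length_append, hnil] at this
      omega
    · intro hc; cases hc

theorem getD_of_not_contains (d : PySem.Dict Int String) (k : Int)
    (h : d.contains k = false) : d.getD k "" = "" := by
  show (d.get? k).getD "" = ""
  rw [(PySem.Dict.get?_eq_none_iff_contains d k).mpr h]
  rfl

theorem innerA (num : Int) (ds : List Int) (divs : PySem.Dict Int String) :
    (ds.foldl (stepA num) divs).getD num ""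
        = divs.getD num "" ++ String.join (ds.filterMap (fmA num))
    ∧ ((ds.foldl (stepA num) divs).contains num = true
        ↔ (divs.contains num = true ∨ ds.filterMap (fmA num) ≠ []))
    ∧ (∀ j, j ≠ num → (ds.foldl (stepA num) divs).contains j = divs.contains j) := by
  induction ds generalizing divs with
  | nil =>
    refine ⟨by simp [String.join], by simp, fun j _ => rfl⟩
  | cons d t ih =>
    by_cases hmod : PySem.Int.mod num d = 0
    · have hfm : (d :: t).filterMap (fmA num)
          = (PySem.Int.toStr d ++ "-") :: t.filterMap (fmA num) := by
        simp [fmA, hmod]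
      set divs2 := if divs.contains num then divs else divs.insert num "" with hd2
      have hgd2 : divs2.getD num "" = divs.getD num "" := by
        rw [hd2]
        by_cases hc : divs.contains num = true
        · rw [if_pos hc]
        · rw [if_neg (by simp [hc]), PySem.Dict.getD_insert_self,
              getD_of_not_contains divs num (by simpa using hc)]
      set divs1 := divs2.insert num (divs2.getD num "" ++ (PySem.Int.toStr d ++ "-")) with hd1
      have hstep : stepA num divs d = divs1 := by
        rw [hd1, hd2]; unfold stepA; rw [if_pos hmod]
      have hfold : (d :: t).foldl (stepA num) divs = t.foldl (stepA num) divs1 := by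
        rw [List.foldl_cons, hstep]
      obtain ⟨ih1, ih2, ih3⟩ := ih divs1
      have hg1 : divs1.getD num "" = divs.getD num "" ++ (PySem.Int.toStr d ++ "-") := by
        rw [hd1, PySem.Dict.getD_insert_self, hgd2]
      have hc1 : divs1.contains num = true := by
        rw [hd1]; simp [PySem.Dict.contains_insert]
      refine ⟨?_, ?_, ?_⟩
    
      · rw [hfold, ih1, hg1, hfm, join_cons, String.append_assoc]
      · rw [hfold, hfm]
        simp [ih2, hc1]
      · intro j hj
        rw [hfold, ih3 j hj, hd1, PySem.Dict.contains_insert]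
        have : (j == num) = false := by simp [hj]
        rw [this, Bool.false_or, hd2]
        by_cases hc : divs.contains num = true
        · rw [if_pos hc]
        · rw [if_neg (by simp [hc]), PySem.Dict.contains_insert]
          simp [hj]
    · have hfm : (d :: t).filterMap (fmA num) = t.filterMap (fmA num) := by
        simp [fmA, hmod]
      have hstep : stepA num divs d = divs := by unfold stepA; rw [if_neg hmod]
      have hfold : (d :: t).foldl (stepA num) divs = t.foldl (stepA num) divs := by
        rw [List.foldl_cons, hstep]
      obtain ⟨ih1, ih2, ih3⟩ := ih divs
      exact ⟨by rw [hfold, hfm, ih1], by rw [hfold, hfm]; exact ih2, fun j hj => by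
        rw [hfold]; exact ih3 j hj⟩

theorem keys_pvAddToKey (items : List (String × PySem.Set Int)) (key : String) (num : Int) :
    (PySem.Dict.mk (pvAddToKey items key num)).keys = (PySem.Dict.mk items).keys := by
  show (pvAddToKey items key num).map (fun x => x.1) = items.map (fun x => x.1)
  induction items with
  | nil => rfl
  | cons p rest ih =>
    obtain ⟨k, v⟩ := p
    unfold pvAddToKey
    by_cases h : (k == key) = true
    · rw [if_pos h]; simp
    · rw [if_neg h]
      show k :: (pvAddToKey rest key num).map (fun x => x.1) = k :: rest.map (fun x => x.1)
      rw [ih]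

theorem keys_mk_items (d : PySem.Dict String (PySem.Set Int)) :
    (PySem.Dict.mk d.items).keys = d.keys := rfl

theorem clans_step (clans : PySem.Dict String (PySem.Set Int)) (key : String) (num : Int) :
    (PySem.Dict.mk (pvAddToKey
        (if clans.contains key then clans else clans.insert key PySem.Set.empty).items
        key num)).keys
      = PySem.Set.add clans.keys key := by
  rw [keys_pvAddToKey]
  by_cases hc : clans.contains key = true
  · rw [if_pos hc, keys_mk_items]
    have hm : key ∈ clans.keys := (PySem.Dict.contains_iff_mem_keys _ _).mp hc
    simp [PySem.Set.add, hm]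
  · have hc' : clans.contains key = false := by simp at hc; exact hc
    rw [if_neg (by simp [hc']), keys_mk_items,
        PySem.Dict.keys_insert_of_not_contains _ _ hc']
    have hm : key ∉ clans.keys := fun hmem =>
      absurd ((PySem.Dict.contains_iff_mem_keys _ _).mpr hmem) (by simp [hc'])
    simp [PySem.Set.add, hm]

theorem outerA (divisors : List Int) (nums : List Int) :
    ∀ (clans : PySem.Dict String (PySem.Set Int)),
      ((nums.foldl (bigStepA divisors) clans)).keys
        = nums.foldl (fun s n => PySem.Set.add s (keyOf divisors n)) clans.keys := by
  induction nums with
  | nil => intro _; rfl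
  | cons num t ih =>
    intro clans
    obtain ⟨hg, hcont, -⟩ := innerA num divisors PySem.Dict.empty
    set divs1 := divisors.foldl (stepA num) PySem.Dict.empty with hd1
    have hg' : divs1.getD num "" = sigOf divisors num := by
      rw [hg, getD_of_not_contains PySem.Dict.empty num (PySem.Dict.contains_empty num),
          String.empty_append]
      rfl
    have hbig : bigStepA divisors clans num
        = PySem.Dict.mk (pvAddToKey
            (if clans.contains (keyOf divisors num) then clans
              else clans.insert (keyOf divisors num) PySem.Set.empty).items
            (keyOf divisors num) num) := by
      unfold bigStepA
      simp only [← hd1]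
      by_cases hc : divs1.contains num = true
      · have hsig : sigOf divisors num ≠ "" := by
          intro hs
          have hnil : divisors.filterMap (fmA num) = [] :=
            (join_fm_eq_empty_iff divisors num).mp hs
          rcases hcont.mp hc with h | h
          · rw [PySem.Dict.contains_empty] at h; cases h
          · exact h hnil
        have hkey : keyOf divisors num = sigOf divisors num := by
          unfold keyOf; rw [if_neg hsig]
        rw [if_pos hc, hg', hkey]
      · have hc' : divs1.contains num = false := by simp at hc; exact hc
        have hsig : sigOf divisors num = "" := by
          unfold sigOf
          rw [join_fm_eq_empty_iff]
          by_contra hne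
          rw [hcont.mpr (Or.inr hne)] at hc'
          cases hc'
        have hkey : keyOf divisors num = "empty" := by unfold keyOf; rw [if_pos hsig]
        rw [if_neg hc, hkey]
    rw [List.foldl_cons, List.foldl_cons, hbig, ih, clans_step]

theorem A_count (divisors : List Int) (k : Int) :
    numberOfClans divisors k
      = ((PySem.Set.ofList ((PySem.List.pyRange 1 (k+1) 1).map (keyOf divisors))).length : Int) := by
  rw [numberOfClans_eq, outerA divisors _ PySem.Dict.empty]
  rw [PySem.Dict.keys_empty, ← PySem.Set.update_map_eq_foldl_add, PySem.Set.update_nil_left]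

theorem alt_eq (divisors : List Int) (k : Int) :
    numberOfClans_alt divisors k
      = ((PySem.Set.ofList ((PySem.List.pyRange 1 (min k (lcmF divisors) + 1) 1).map
            (keyOf divisors))).length : Int) := by
  show PySem.Set.len ((PySem.List.pyRange 1 (min k (lcmF divisors) + 1) 1).foldl
        (fun s n => PySem.Set.add s (keyOf divisors n)) PySem.Set.empty) = _
  rw [← PySem.Set.update_map_eq_foldl_add]
  show PySem.Set.len (PySem.Set.update [] _) = _
  rw [PySem.Set.update_nil_left]
  rfl

theorem pvEuclid_spec (b a : Int) (hb : 0 ≤ b) (ha : 0 < a) :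
    0 < pvEuclid a b ∧ pvEuclid a b ∣ a ∧ pvEuclid a b ∣ b := by
  rw [pvEuclid]
  by_cases h : 0 < b
  · rw [if_pos h]
    have h1 := PySem.Int.mod_nonneg a h
    have h2 := PySem.Int.mod_lt a h
    obtain ⟨g1, g2, g3⟩ := pvEuclid_spec (PySem.Int.mod a b) b h1 h
    refine ⟨g1, ?_, g2⟩
    have := PySem.Int.floordiv_mul_add_mod a b
    calc pvEuclid b (PySem.Int.mod a b)
        ∣ PySem.Int.floordiv a b * b + PySem.Int.mod a b :=
          dvd_add (Dvd.dvd.mul_left g2 _) g3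
      _ = a := this
  · rw [if_neg h]
    have hb0 : b = 0 := by omega
    exact ⟨ha, dvd_refl a, by rw [hb0]; exact dvd_zero a⟩
termination_by b.toNat
decreasing_by
  have h1 := PySem.Int.mod_nonneg a h
  have h2 := PySem.Int.mod_lt a h
  omega

theorem lcmF_spec (divisors : List Int) :
    0 < lcmF divisors ∧ ∀ d ∈ divisors, d ≠ 0 → d ∣ lcmF divisors := by
  have H : ∀ (ds : List Int) (L : Int), 0 < L →
      0 < ds.foldl (fun L d => if d ≠ 0 then PySem.Int.floordiv (L * |d|) (pvEuclid L |d|) else L) L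
      ∧ L ∣ ds.foldl (fun L d => if d ≠ 0 then PySem.Int.floordiv (L * |d|) (pvEuclid L |d|) else L) L
      ∧ ∀ d ∈ ds, d ≠ 0 →
          d ∣ ds.foldl (fun L d => if d ≠ 0 then PySem.Int.floordiv (L * |d|) (pvEuclid L |d|) else L) L := by
    intro ds
    induction ds with
    | nil => intro L hL; exact ⟨hL, dvd_refl L, by simp⟩
    | cons d t ih =>
      intro L hL
      by_cases hd : d = 0
      · rw [List.foldl_cons, if_neg (by simp [hd])]
        obtain ⟨i1, i2, i3⟩ := ih L hL
        exact ⟨i1, i2, fun e he hne => by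
          rcases List.mem_cons.mp he with h | h
          · exact absurd (h.trans hd) hne
          · exact i3 e h hne⟩
      · have habs : (0:Int) < |d| := by positivity
        obtain ⟨g1, g2, g3⟩ := pvEuclid_spec |d| L (le_of_lt habs) hL
        set g := pvEuclid L |d| with hgdef
        set L1 := PySem.Int.floordiv (L * |d|) g with hL1def
        have hediv : L1 = L * |d| / g := by rw [hL1def, PySem.Int.floordiv_eq_ediv_of_pos g1]
        have hA : L1 = L * (|d| / g) := by rw [hediv, Int.mul_ediv_assoc L g3]
        have hB : L1 = (L / g) * |d| := by rw [hediv, Int.mul_ediv_assoc' |d| g2]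
        have hLg : 0 < L / g := by
          obtain ⟨c, hc⟩ := g2
          have : L / g = c := by rw [hc, Int.mul_ediv_cancel_left c (ne_of_gt g1)]
          rw [this]
          nlinarith
        have hL1pos : 0 < L1 := by rw [hB]; positivity
        have hLdvd : L ∣ L1 := hA ▸ Dvd.intro _ rfl
        have hddvd : d ∣ L1 := by
          have : |d| ∣ L1 := hB ▸ Dvd.intro_left _ rfl
          exact dvd_trans ((dvd_abs d d).mpr dvd_rfl) this
        rw [List.foldl_cons, if_pos hd, ← hgdef, ← hL1def]
        obtain ⟨i1, i2, i3⟩ := ih L1 hL1pos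
        refine ⟨i1, dvd_trans hLdvd i2, fun e he hne => ?_⟩
        rcases List.mem_cons.mp he with h | h
        · exact dvd_trans (h ▸ hddvd) i2
        · exact i3 e h hne
  have := H divisors 1 one_pos
  exact ⟨this.1, this.2.2⟩

theorem key_period (divisors : List Int) {L : Int} (hL : 0 < L)
    (hdvd : ∀ d ∈ divisors, d ∣ L) (n : Int) :
    keyOf divisors n = keyOf divisors ((n-1) % L + 1) := by
  suffices hs : sigOf divisors n = sigOf divisors ((n-1) % L + 1) by
    unfold keyOf; rw [hs]
  unfold sigOf
  congr 1
  apply List.filterMap_congr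
  intro d hd
  have hdL := hdvd d hd
  have hsub : n - ((n-1) % L + 1) = L * ((n-1)/L) := by
    have := Int.emod_def (n-1) L
    omega
  have hd2 : d ∣ (n - ((n-1) % L + 1)) := hsub ▸ Dvd.dvd.mul_right hdL _
  have hiff : (PySem.Int.mod n d = 0) ↔ (PySem.Int.mod ((n-1) % L + 1) d = 0) := by
    rw [PySem.Int.mod_eq_zero_iff_dvd, PySem.Int.mod_eq_zero_iff_dvd]
    constructor
    · intro h
      have := dvd_sub h hd2
      simpa using this
    · intro h
      have := dvd_add h hd2
      have he : ((n-1) % L + 1) + (n - ((n-1) % L + 1)) = n := by ring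
      rwa [he] at this
  unfold fmA
  by_cases h : PySem.Int.mod n d = 0
  · rw [if_pos h, if_pos (hiff.mp h)]
  · rw [if_neg h, if_neg (fun hc => h (hiff.mpr hc))]

theorem count_eq (xs ys : List String) (h : ∀ x, x ∈ xs ↔ x ∈ ys) :
    (PySem.Set.ofList xs).length = (PySem.Set.ofList ys).length := by
  rw [← List.toFinset_card_of_nodup (PySem.Set.nodup_ofList xs),
      ← List.toFinset_card_of_nodup (PySem.Set.nodup_ofList ys)]
  congr 1
  ext x
  simp [PySem.Set.mem_ofList, h x]

-- ===== VERDICT (by name: the statement is the Claim_ definition above) =====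
theorem numberOfClans_spec : Claim_equal_numberOfClans := by
  intro divisors k _ hpre
  show numberOfClans divisors k = numberOfClans_alt divisors k
  rw [A_count, alt_eq]
  obtain ⟨hL, hdv⟩ := lcmF_spec divisors
  set L := lcmF divisors with hLdef
  have H : ∀ x, x ∈ (PySem.List.pyRange 1 (k+1) 1).map (keyOf divisors)
      ↔ x ∈ (PySem.List.pyRange 1 (min k L + 1) 1).map (keyOf divisors) := by
    intro x
    by_cases hk : k ≤ 0
    · rw [PySem.List.pyRange_one_eq_nil (by omega),
          PySem.List.pyRange_one_eq_nil (by omega : min k L + 1 ≤ 1)]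
    · push_neg at hk
      have h0 : (0:Int) ∉ divisors := by
        rcases hpre with h | h
        · omega
        · exact h
      have hdvd : ∀ d ∈ divisors, d ∣ L := by
        intro d hd
        exact hdv d hd (fun he => h0 (he ▸ hd))
      simp only [List.mem_map, PySem.List.mem_pyRange_one]
      constructor
      · rintro ⟨n, ⟨hn1, hn2⟩, hkey⟩
        refine ⟨(n-1) % L + 1, ⟨?_, ?_⟩, ?_⟩
        · have := Int.emod_nonneg (n-1) (ne_of_gt hL)
          omega
        · have hlt := Int.emod_lt_of_pos (n-1) hL
          have hle : (n-1) % L ≤ n - 1 := by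
            have hq : 0 ≤ (n-1)/L := Int.ediv_nonneg (by omega) (le_of_lt hL)
            have hprod : 0 ≤ L * ((n-1)/L) := mul_nonneg (le_of_lt hL) hq
            have := Int.emod_def (n-1) L
            omega
          omega
        · rw [← key_period divisors hL hdvd n]; exact hkey
      · rintro ⟨n, ⟨hn1, hn2⟩, hkey⟩
        exact ⟨n, ⟨hn1, by omega⟩, hkey⟩
  exact_mod_cast count_eq _ _ H
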